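-- pv_equiv track=rewrite | github.com/teemollt/aps | DP/신나는함수실행_bj9184.py | dp
-- ===== SOURCE A (Python) =====
-- def dp(a, b, c):
--     if a <= 0 or b <= 0 or c <= 0:
--         return 1
--     if a > 20 or b > 20 or c > 20:
--         return dp(20, 20, 20)
--     if m[a][b][c]:
--         return m[a][b][c]
--     if a < b < c:
--         m[a][b][c] = dp(a, b, c-1) + dp(a, b-1, c-1) - dp(a, b-1, c)
--         return m[a][b][c]
--     m[a][b][c] = dp(a-1, b, c) + dp(a-1, b-1, c) + dp(a-1, b, c-1) - dp(a-1, b-1, c-1)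
--     return m[a][b][c]
--
-- m = [[[0] * 21 for _ in range(21)] for _ in range(21)]
-- ===== SOURCE B (Python) =====
-- def _fill():
--     T = {}
--     def g(a, b, c):
--         return 1 if a <= 0 or b <= 0 or c <= 0 else T[(a, b, c)]
--     for a in range(1, 21):
--         for b in range(1, 21):
--             for c in range(1, 21):
--                 if a < b < c:
--                     T[(a, b, c)] = g(a, b, c - 1) + g(a, b - 1, c - 1) - g(a, b - 1, c)
--                 else:
--                     T[(a, b, c)] = (g(a - 1, b, c) + g(a - 1, b - 1, c)
--                                     + g(a - 1, b, c - 1) - g(a - 1, b - 1, c - 1))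
--     return T
--
-- _T = _fill()
--
-- def dp(a, b, c):
--     if a <= 0 or b <= 0 or c <= 0:
--         return 1
--     if a > 20 or b > 20 or c > 20:
--         return _T[(20, 20, 20)]
--     return _T[(a, b, c)]
-- ===== Notes on version B (the rewrite author's own statement) =====
-- stated objective: alternative
-- what changed: Replaces A's top-down memoized recursion (global 3D memo list, recursive calls with a truthiness cache check) by a one-time bottom-up fill of the full 20x20x20 table in lexicographic loop order, so dp itself becomes a guarded dictionary lookup with no recursion.
import Mathlib
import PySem

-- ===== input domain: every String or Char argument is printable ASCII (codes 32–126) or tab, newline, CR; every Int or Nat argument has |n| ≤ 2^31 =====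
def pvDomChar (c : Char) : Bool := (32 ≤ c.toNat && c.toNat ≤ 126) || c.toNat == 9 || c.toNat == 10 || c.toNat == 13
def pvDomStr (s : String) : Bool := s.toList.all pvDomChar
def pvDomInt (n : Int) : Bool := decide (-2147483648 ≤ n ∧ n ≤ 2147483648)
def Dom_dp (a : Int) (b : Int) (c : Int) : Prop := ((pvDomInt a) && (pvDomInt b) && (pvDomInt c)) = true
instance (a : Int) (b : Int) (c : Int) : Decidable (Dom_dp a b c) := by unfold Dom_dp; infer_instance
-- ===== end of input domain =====

-- B replaces A's memoized top-down recursion by a one-time bottom-up table fill, keeping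
-- dp's guards identical (objective: alternative decomposition, same values everywhere).
-- A mutates its module-level memo list `m` as a cache; that side effect is value-transparent
-- and the equivalence proved here is about the RETURN value.

-- ===== PORT A =====
-- Literal port of A's memoized recursion: the memo `m` (a module-level 21x21x21 list of 0s,
-- truthiness-checked) is threaded explicitly as an insertion-ordered dict; `getD _ 0 ≠ 0`
-- is exactly Python's `if m[a][b][c]:` (unset cells hold 0).  A's recursive calls go through
-- the full dp, but from in-range arguments the `> 20` guard can never fire (arguments only
-- decrease), so the recursion carries only the two reachable branches — exact.
def dpGo : Nat → PySem.Dict (Int × Int × Int) Int → Int → Int → Int →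
    Int × PySem.Dict (Int × Int × Int) Int
  -- fuel = (a+b+c).toNat bounds the recursion depth; the 0 case is unreachable from dp's calls
  -- (the guard below is already true there), it only makes the recursion structural
  | 0, m, _, _, _ => (1, m)
  | n + 1, m, a, b, c =>
    if a ≤ 0 ∨ b ≤ 0 ∨ c ≤ 0 then (1, m)
    else
      let v := m.getD (a, b, c) 0
      if v ≠ 0 then (v, m)
      else if a < b ∧ b < c then
        let p1 := dpGo n m a b (c - 1)
        let p2 := dpGo n p1.2 a (b - 1) (c - 1)
        let p3 := dpGo n p2.2 a (b - 1) c
        let r := p1.1 + p2.1 - p3.1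
        (r, p3.2.insert (a, b, c) r)
      else
        let p1 := dpGo n m (a - 1) b c
        let p2 := dpGo n p1.2 (a - 1) (b - 1) c
        let p3 := dpGo n p2.2 (a - 1) b (c - 1)
        let p4 := dpGo n p3.2 (a - 1) (b - 1) (c - 1)
        let r := p1.1 + p2.1 + p3.1 - p4.1
        (r, p4.2.insert (a, b, c) r)

-- Python's memo persists across top-level calls; starting each call from the empty memo is
-- value-equivalent (the memo only caches already-computed values).
def dp (a : Int) (b : Int) (c : Int) : Int :=
  if a ≤ 0 ∨ b ≤ 0 ∨ c ≤ 0 then 1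
  else if a > 20 ∨ b > 20 ∨ c > 20 then (dpGo 60 PySem.Dict.empty 20 20 20).1
  else (dpGo (a + b + c).toNat PySem.Dict.empty a b c).1

-- ===== PORT B =====
-- Port of Source B: `g`, the loop body, the lexicographic cell order, the one-time table, the lookup.
-- Source B's `T[(a,b,c)]` lookups during the fill always hit a present key; `getD _ 0` is exact there.
def fillGet (t : PySem.Dict (Int × Int × Int) Int) (a b c : Int) : Int :=
  if a ≤ 0 ∨ b ≤ 0 ∨ c ≤ 0 then 1 else t.getD (a, b, c) 0

def fillStep (t : PySem.Dict (Int × Int × Int) Int) (p : Int × Int × Int) :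
    PySem.Dict (Int × Int × Int) Int :=
  if p.1 < p.2.1 ∧ p.2.1 < p.2.2 then
    t.insert p (fillGet t p.1 p.2.1 (p.2.2 - 1) + fillGet t p.1 (p.2.1 - 1) (p.2.2 - 1)
                - fillGet t p.1 (p.2.1 - 1) p.2.2)
  else
    t.insert p (fillGet t (p.1 - 1) p.2.1 p.2.2 + fillGet t (p.1 - 1) (p.2.1 - 1) p.2.2
                + fillGet t (p.1 - 1) p.2.1 (p.2.2 - 1) - fillGet t (p.1 - 1) (p.2.1 - 1) (p.2.2 - 1))

def fillCells : List (Int × Int × Int) :=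
  (PySem.List.pyRange 1 21 1).flatMap fun a =>
    (PySem.List.pyRange 1 21 1).flatMap fun b =>
      (PySem.List.pyRange 1 21 1).map fun c => (a, b, c)

def fillTable : PySem.Dict (Int × Int × Int) Int :=
  fillCells.foldl fillStep PySem.Dict.empty

def dp_alt (a : Int) (b : Int) (c : Int) : Int :=
  if a ≤ 0 ∨ b ≤ 0 ∨ c ≤ 0 then 1
  else if a > 20 ∨ b > 20 ∨ c > 20 then fillTable.getD (20, 20, 20) 0
  else fillTable.getD (a, b, c) 0

-- ===== PRECONDITION & SPEC =====
def Spec_dp (a : Int) (b : Int) (c : Int) (out : Int) : Prop := out = dp_alt a b c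
instance (a : Int) (b : Int) (c : Int) (out : Int) : Decidable (Spec_dp a b c out) := by unfold Spec_dp; infer_instance

-- ===== CLAIM (what is proved, stated in full; the proofs are below) =====
def Claim_equal_dp : Prop := ∀ (a : Int) (b : Int) (c : Int), Dom_dp a b c → Spec_dp a b c (dp a b c)

-- ===== LEMMAS AND PROOFS =====

-- The mathematical recurrence both programs compute.
def W (a b c : Int) : Int :=
  if a ≤ 0 ∨ b ≤ 0 ∨ c ≤ 0 then 1
  else if a < b ∧ b < c then W a b (c - 1) + W a (b - 1) (c - 1) - W a (b - 1) c
  else W (a - 1) b c + W (a - 1) (b - 1) c + W (a - 1) b (c - 1) - W (a - 1) (b - 1) (c - 1)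
termination_by (a + b + c).toNat
decreasing_by all_goals omega

-- Every value a good memo stores is the corresponding W value.
def GoodMemo (m : PySem.Dict (Int × Int × Int) Int) : Prop :=
  ∀ a b c v, m.get? (a, b, c) = some v → v = W a b c

theorem goodMemo_empty : GoodMemo PySem.Dict.empty := by
  intro a b c v h
  simp [PySem.Dict.get?_empty] at h

theorem dpGo_correct : ∀ (n : ℕ) (a b c : Int) (m : PySem.Dict (Int × Int × Int) Int),
    (a + b + c).toNat ≤ n → GoodMemo m →
    (dpGo n m a b c).1 = W a b c ∧ GoodMemo (dpGo n m a b c).2 := by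
  intro n
  induction n with
  | zero =>
    intro a b c m hn hg
    have h0 : a ≤ 0 ∨ b ≤ 0 ∨ c ≤ 0 := by omega
    exact ⟨by simp [dpGo, W, h0], hg⟩
  | succ n ih =>
    intro a b c m hn hg
    simp only [dpGo]
    split_ifs with h0 hv hlex
    · exact ⟨by rw [W, if_pos h0], hg⟩
    · refine ⟨?_, hg⟩
      cases h : m.get? (a, b, c) with
      | none =>
        exfalso; apply hv
        rw [PySem.Dict.getD_eq_get?_getD, h]; rfl
      | some w =>
        have hw : m.getD (a, b, c) 0 = w := by rw [PySem.Dict.getD_eq_get?_getD, h]; rfl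
        rw [hw]
        exact hg a b c w h
    · have H1 := ih a b (c - 1) m (by omega) hg
      have H2 := ih a (b - 1) (c - 1) (dpGo n m a b (c - 1)).2 (by omega) H1.2
      have H3 := ih a (b - 1) c (dpGo n (dpGo n m a b (c - 1)).2 a (b - 1) (c - 1)).2 (by omega) H2.2
      constructor
      · show _ + _ - _ = W a b c
        rw [H1.1, H2.1, H3.1]
        conv_rhs => rw [W]
        rw [if_neg h0, if_pos hlex]
      · intro x y z v hv'
        rw [PySem.Dict.get?_insert] at hv'
        split_ifs at hv' with he
        · obtain ⟨rfl, rfl, rfl⟩ : x = a ∧ y = b ∧ z = c := by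
            simpa [Prod.mk.injEq] using he
          have := Option.some.inj hv'
          rw [← this, H1.1, H2.1, H3.1]
          conv_rhs => rw [W]
          rw [if_neg h0, if_pos hlex]
        · exact H3.2 x y z v hv'
    · have H1 := ih (a - 1) b c m (by omega) hg
      have H2 := ih (a - 1) (b - 1) c (dpGo n m (a - 1) b c).2 (by omega) H1.2
      have H3 := ih (a - 1) b (c - 1) (dpGo n (dpGo n m (a - 1) b c).2 (a - 1) (b - 1) c).2
        (by omega) H2.2
      have H4 := ih (a - 1) (b - 1) (c - 1)
        (dpGo n (dpGo n (dpGo n m (a - 1) b c).2 (a - 1) (b - 1) c).2 (a - 1) b (c - 1)).2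
        (by omega) H3.2
      constructor
      · show _ + _ + _ - _ = W a b c
        rw [H1.1, H2.1, H3.1, H4.1]
        conv_rhs => rw [W]
        rw [if_neg h0, if_neg hlex]
      · intro x y z v hv'
        rw [PySem.Dict.get?_insert] at hv'
        split_ifs at hv' with he
        · obtain ⟨rfl, rfl, rfl⟩ : x = a ∧ y = b ∧ z = c := by
            simpa [Prod.mk.injEq] using he
          have := Option.some.inj hv'
          rw [← this, H1.1, H2.1, H3.1, H4.1]
          conv_rhs => rw [W]
          rw [if_neg h0, if_neg hlex]
        · exact H4.2 x y z v hv'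

-- strict lexicographic order on cells: the order in which B's loops fill the table
def cellLt (p q : Int × Int × Int) : Prop :=
  p.1 < q.1 ∨ (p.1 = q.1 ∧ (p.2.1 < q.2.1 ∨ (p.2.1 = q.2.1 ∧ p.2.2 < q.2.2)))

theorem cellLt_mk (x y z x' y' z' : Int)
    (h : x < x' ∨ (x = x' ∧ (y < y' ∨ (y = y' ∧ z < z')))) : cellLt (x, y, z) (x', y', z') := h

theorem mem_fillCells {p : Int × Int × Int} :
    p ∈ fillCells ↔ (1 ≤ p.1 ∧ p.1 ≤ 20) ∧ (1 ≤ p.2.1 ∧ p.2.1 ≤ 20) ∧ (1 ≤ p.2.2 ∧ p.2.2 ≤ 20) := by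
  obtain ⟨a, b, c⟩ := p
  simp only [fillCells, List.mem_flatMap, List.mem_map, PySem.List.mem_pyRange_one,
    Prod.mk.injEq]
  constructor
  · rintro ⟨x, hx, y, hy, z, hz, rfl, rfl, rfl⟩
    omega
  · rintro ⟨⟨h1, h2⟩, ⟨h3, h4⟩, ⟨h5, h6⟩⟩
    exact ⟨a, by omega, b, by omega, c, by omega, rfl, rfl, rfl⟩

theorem pairwise_fillCells : fillCells.Pairwise cellLt := by
  unfold fillCells
  refine List.pairwise_flatMap.2 ⟨?_, ?_⟩
  · intro a _
    refine List.pairwise_flatMap.2 ⟨?_, ?_⟩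
    · intro b _
      rw [List.pairwise_map]
      refine (PySem.List.pairwise_lt_pyRange_one 1 21).imp ?_
      intro c c' h
      exact Or.inr ⟨rfl, Or.inr ⟨rfl, h⟩⟩
    · refine (PySem.List.pairwise_lt_pyRange_one 1 21).imp ?_
      intro b b' h x hx y hy
      simp only [List.mem_map] at hx hy
      obtain ⟨c, -, rfl⟩ := hx
      obtain ⟨c', -, rfl⟩ := hy
      exact Or.inr ⟨rfl, Or.inl h⟩
  · refine (PySem.List.pairwise_lt_pyRange_one 1 21).imp ?_
    intro a a' h x hx y hy
    simp only [List.mem_flatMap, List.mem_map] at hx hy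
    obtain ⟨b, -, c, -, rfl⟩ := hx
    obtain ⟨b', -, c', -, rfl⟩ := hy
    exact Or.inl h

theorem nodup_fillCells : fillCells.Nodup := by
  refine pairwise_fillCells.imp ?_
  intro p q h heq
  subst heq
  obtain ⟨a, b, c⟩ := p
  simp only [cellLt] at h
  omega

theorem fill_inv : ∀ (l r : List (Int × Int × Int)), fillCells = l ++ r →
    ∀ q ∈ l, (l.foldl fillStep PySem.Dict.empty).getD q 0 = W q.1 q.2.1 q.2.2 := by
  intro l
  induction l using List.reverseRecOn with
  | nil => intro r h q hq; simp at hq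
  | append_singleton l p ih =>
    intro r h q hq
    have h' : fillCells = l ++ (p :: r) := by rw [h, List.append_assoc]; rfl
    have hpr : ∀ y ∈ r, cellLt p y := by
      have hpw := pairwise_fillCells
      rw [h'] at hpw
      exact (List.pairwise_cons.1 (List.pairwise_append.1 hpw).2.1).1
    have hmem_p : p ∈ fillCells := by
      rw [h']; exact List.mem_append_right _ (List.mem_cons_self)
    have hp := mem_fillCells.1 hmem_p
    have ihl := ih (p :: r) h'
    have hearlier : ∀ u, u ∈ fillCells → cellLt u p → u ∈ l := by
      intro u hu hlt
      rw [h'] at hu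
      rcases List.mem_append.1 hu with h1 | h1
      · exact h1
      · exfalso
        rcases List.mem_cons.1 h1 with rfl | h2
        · obtain ⟨x, y, z⟩ := u
          simp only [cellLt] at hlt; omega
        · have := hpr u h2
          obtain ⟨x, y, z⟩ := u
          obtain ⟨x', y', z'⟩ := p
          simp only [cellLt] at hlt this; omega
    rw [List.foldl_append, List.foldl_cons, List.foldl_nil]
    set t := l.foldl fillStep PySem.Dict.empty with ht
    have hlook : ∀ x y z : Int, cellLt (x, y, z) p → x ≤ 20 → y ≤ 20 → z ≤ 20 →
        fillGet t x y z = W x y z := by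
      intro x y z hlt hx hy hz
      unfold fillGet
      split_ifs with h0
      · rw [W, if_pos h0]
      · have hin : (x, y, z) ∈ l := by
          refine hearlier _ (mem_fillCells.2 ?_) hlt
          exact ⟨⟨show (1:Int) ≤ x by omega, hx⟩, ⟨show (1:Int) ≤ y by omega, hy⟩,
            ⟨show (1:Int) ≤ z by omega, hz⟩⟩
        exact ihl _ hin
    rcases List.mem_append.1 hq with hql | hqp
    · have hne : q ≠ p := by
        intro heq
        have hnd := nodup_fillCells
        rw [h'] at hnd
        exact (List.nodup_append.1 hnd).2.2 q hql p (List.mem_cons_self) heq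
      unfold fillStep
      split_ifs with hb <;>
        (rw [PySem.Dict.getD_insert, if_neg hne]; exact ihl q hql)
    · have hqp' : q = p := by simpa using hqp
      subst hqp'
      obtain ⟨a, b, c⟩ := q
      have ha1 : (1 : Int) ≤ a := hp.1.1
      have ha2 : a ≤ (20 : Int) := hp.1.2
      have hb1 : (1 : Int) ≤ b := hp.2.1.1
      have hb2 : b ≤ (20 : Int) := hp.2.1.2
      have hc1 : (1 : Int) ≤ c := hp.2.2.1
      have hc2 : c ≤ (20 : Int) := hp.2.2.2
      unfold fillStep
      dsimp only
      split_ifs with hb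
      · rw [PySem.Dict.getD_insert_self]
        rw [hlook a b (c - 1) (cellLt_mk _ _ _ _ _ _ (by omega)) (by omega) (by omega) (by omega),
            hlook a (b - 1) (c - 1) (cellLt_mk _ _ _ _ _ _ (by omega)) (by omega) (by omega) (by omega),
            hlook a (b - 1) c (cellLt_mk _ _ _ _ _ _ (by omega)) (by omega) (by omega) (by omega)]
        conv_rhs => rw [W]
        rw [if_neg (by omega), if_pos hb]
      · rw [PySem.Dict.getD_insert_self]
        rw [hlook (a - 1) b c (cellLt_mk _ _ _ _ _ _ (by omega)) (by omega) (by omega) (by omega),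
            hlook (a - 1) (b - 1) c (cellLt_mk _ _ _ _ _ _ (by omega)) (by omega) (by omega) (by omega),
            hlook (a - 1) b (c - 1) (cellLt_mk _ _ _ _ _ _ (by omega)) (by omega) (by omega) (by omega),
            hlook (a - 1) (b - 1) (c - 1) (cellLt_mk _ _ _ _ _ _ (by omega)) (by omega) (by omega)
              (by omega)]
        conv_rhs => rw [W]
        rw [if_neg (by omega), if_neg hb]

theorem fillTable_getD (a b c : Int) (h1 : 1 ≤ a) (h2 : a ≤ 20) (h3 : 1 ≤ b) (h4 : b ≤ 20)
    (h5 : 1 ≤ c) (h6 : c ≤ 20) : fillTable.getD (a, b, c) 0 = W a b c := by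
  have := fill_inv fillCells [] (by simp) (a, b, c)
    (mem_fillCells.2 ⟨⟨h1, h2⟩, ⟨h3, h4⟩, ⟨h5, h6⟩⟩)
  simpa [fillTable] using this

-- ===== VERDICT (by name: the statement is the Claim_ definition above) =====
theorem dp_spec : Claim_equal_dp := by
  intro a b c _
  unfold Spec_dp dp dp_alt
  split_ifs with h1 h2
  · rfl
  · rw [(dpGo_correct 60 20 20 20 PySem.Dict.empty (by omega) goodMemo_empty).1,
      fillTable_getD 20 20 20] <;> omega
  · rw [(dpGo_correct (a + b + c).toNat a b c PySem.Dict.empty le_rfl goodMemo_empty).1,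
      fillTable_getD a b c] <;> omega
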